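-- pv_equiv track=rewrite | github.com/notbleaux/eSports-EXE | archive/.job-board/FRAMEWORK/VERIFICATION_SCRIPTS/deduplicate.py | select_canonical
-- ===== SOURCE A (Python) =====
-- from typing import List, Dict, Tuple, Set
--
-- def select_canonical(duplicate_paths: List[str]) -> Tuple[str, List[str]]:
--     """
--     Select canonical file from duplicates.
--     Strategy: prefer files in 03_COMPLETED/ over 02_CLAIMED/
--     """
--     # Priority: 03_COMPLETED > 02_CLAIMED > others
--     priority_dirs = [
--         ".job-board/03_COMPLETED",
--         ".job-board/02_CLAIMED",
--     ]
--
--     # Sort by priority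
--     def get_priority(path):
--         for i, prefix in enumerate(priority_dirs):
--             if path.startswith(prefix):
--                 return i
--         return len(priority_dirs)
--
--     sorted_paths = sorted(duplicate_paths, key=get_priority)
--     canonical = sorted_paths[0]
--     duplicates = sorted_paths[1:]
--
--     return canonical, duplicates
-- ===== SOURCE B (Python) =====
-- from typing import List, Tuple
--
-- def select_canonical(duplicate_paths: List[str]) -> Tuple[str, List[str]]:
--     """
--     Select canonical file from duplicates.
--     Stable bucket partition into the 3 priority classes (O(n), no sort):
--     03_COMPLETED first, then 02_CLAIMED, then the rest.
--     """
--     completed = []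
--     claimed = []
--     others = []
--     for p in duplicate_paths:
--         if p.startswith(".job-board/03_COMPLETED"):
--             completed.append(p)
--         elif p.startswith(".job-board/02_CLAIMED"):
--             claimed.append(p)
--         else:
--             others.append(p)
--     ordered = completed + claimed + others
--     return ordered[0], ordered[1:]
-- ===== Notes on version B (the rewrite author's own statement) =====
-- stated objective: faster
-- what changed: Replaced the key-based stable sort with a single-pass stable partition into three priority buckets that are concatenated.
-- outside the precondition, e.g. on select_canonical([]): A raises IndexError, B raises IndexError
import Mathlib
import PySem

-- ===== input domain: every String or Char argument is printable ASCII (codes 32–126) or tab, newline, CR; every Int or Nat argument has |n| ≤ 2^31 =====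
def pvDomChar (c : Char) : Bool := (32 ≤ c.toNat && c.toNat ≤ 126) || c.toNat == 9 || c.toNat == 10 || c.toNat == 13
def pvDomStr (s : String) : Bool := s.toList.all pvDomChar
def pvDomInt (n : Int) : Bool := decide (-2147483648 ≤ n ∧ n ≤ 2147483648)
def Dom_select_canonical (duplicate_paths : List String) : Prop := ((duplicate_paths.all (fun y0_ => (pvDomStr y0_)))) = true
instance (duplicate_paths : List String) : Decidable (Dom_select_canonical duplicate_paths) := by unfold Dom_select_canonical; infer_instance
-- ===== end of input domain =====

-- B replaces the key-based stable sort by a one-pass stable partition into the three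
-- priority buckets, concatenated (O(n) instead of sorting); return values proved equal.

-- ===== PORT A =====
def priorityDirs : List String := [".job-board/03_COMPLETED", ".job-board/02_CLAIMED"]

-- the 'for i, prefix in enumerate(priority_dirs): if path.startswith(prefix): return i' loop
def getPriorityGo (path : String) : List (Int × String) → Int
  | [] => PySem.List.len priorityDirs
  | (i, pre) :: rest => if PySem.Str.startswith path pre then i else getPriorityGo path rest

def get_priority (path : String) : Int :=
  getPriorityGo path (PySem.List.enumerate priorityDirs)

def select_canonical (duplicate_paths : List String) : String × List String :=
  let sorted_paths := PySem.List.sorted duplicate_paths get_priority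
  let canonical := PySem.List.pyGetD sorted_paths 0 ""   -- sorted_paths[0]; IndexError on [] excluded by Pre_
  let duplicates := PySem.List.slice sorted_paths (some 1) none
  (canonical, duplicates)

-- ===== PORT B =====
def altStep (acc : List String × List String × List String) (p : String) :
    List String × List String × List String :=
  if PySem.Str.startswith p ".job-board/03_COMPLETED" then (acc.1 ++ [p], acc.2.1, acc.2.2)
  else if PySem.Str.startswith p ".job-board/02_CLAIMED" then (acc.1, acc.2.1 ++ [p], acc.2.2)
  else (acc.1, acc.2.1, acc.2.2 ++ [p])

def select_canonical_alt (duplicate_paths : List String) : String × List String :=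
  let acc := duplicate_paths.foldl altStep ([], [], [])
  let ordered := acc.1 ++ acc.2.1 ++ acc.2.2
  (PySem.List.pyGetD ordered 0 "", PySem.List.slice ordered (some 1) none)

-- ===== PRECONDITION & SPEC =====
-- Pre_ excludes only the empty list, on which Python A raises IndexError at sorted_paths[0].
def Pre_select_canonical (duplicate_paths : List String) : Prop := duplicate_paths ≠ []
instance (duplicate_paths : List String) : Decidable (Pre_select_canonical duplicate_paths) := by
  unfold Pre_select_canonical; infer_instance

def pvWitness_select_canonical : List String := ["other/x", ".job-board/03_COMPLETED/y"]

def Spec_select_canonical (duplicate_paths : List String) (out : String × List String) : Prop := out = select_canonical_alt duplicate_paths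
instance (duplicate_paths : List String) (out : String × List String) : Decidable (Spec_select_canonical duplicate_paths out) := by unfold Spec_select_canonical; infer_instance

-- ===== CLAIM (what is proved, stated in full; the proofs are below) =====
def Claim_equal_select_canonical : Prop := ∀ (duplicate_paths : List String), Dom_select_canonical duplicate_paths → Pre_select_canonical duplicate_paths → Spec_select_canonical duplicate_paths (select_canonical duplicate_paths)

-- ===== LEMMAS AND PROOFS =====

lemma key_cases (p : String) :
    get_priority p =
      if PySem.Str.startswith p ".job-board/03_COMPLETED" then 0
      else if PySem.Str.startswith p ".job-board/02_CLAIMED" then 1 else 2 := rfl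

lemma key_mem (p : String) : get_priority p = 0 ∨ get_priority p = 1 ∨ get_priority p = 2 := by
  rw [key_cases]; split_ifs <;> simp

-- insertBy walks past a prefix it does not insert before and inserts at the head of R
lemma insertBy_mid (before : String → String → Bool) (x : String) :
    ∀ (A R : List String), (∀ a ∈ A, before x a = false) →
      (∀ h t, R = h :: t → before x h = true) →
      PySem.List.insertBy before x (A ++ R) = A ++ x :: R := by
  intro A
  induction A with
  | nil =>
    intro R _ hR
    cases R with
    | nil => rfl
    | cons h t => simp [PySem.List.insertBy, hR h t rfl]
  | cons a A ih =>
    intro R hA hR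
    have ha : before x a = false := hA a (by simp)
    simpa [PySem.List.insertBy, ha] using ih R (fun b hb => hA b (by simp [hb])) hR

-- the stable insertion sort with a {0,1,2}-valued key builds the three buckets in order
lemma sort_buckets :
    ∀ (xs A B C : List String), (∀ a ∈ A, get_priority a = 0) → (∀ b ∈ B, get_priority b = 1) →
      (∀ c ∈ C, get_priority c = 2) →
      xs.foldl (fun acc x => PySem.List.insertBy (fun a b => decide (get_priority a < get_priority b)) x acc) (A ++ B ++ C) =
        (A ++ xs.filter (fun p => decide (get_priority p = 0))) ++
        (B ++ xs.filter (fun p => decide (get_priority p = 1))) ++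
        (C ++ xs.filter (fun p => decide (get_priority p = 2))) := by
  intro xs
  induction xs with
  | nil => intro A B C _ _ _; simp
  | cons x xs ih =>
    intro A B C hA hB hC
    rcases key_mem x with hx | hx | hx
    · have hstep : PySem.List.insertBy (fun a b => decide (get_priority a < get_priority b)) x (A ++ B ++ C)
          = (A ++ [x]) ++ B ++ C := by
        rw [List.append_assoc]
        rw [insertBy_mid _ x A (B ++ C)
          (fun a ha => by simp [hA a ha, hx])
          (fun h t hht => by
            have hh : h ∈ B ++ C := by rw [hht]; simp
            rcases List.mem_append.mp hh with h' | h'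
            · simp [hB h h', hx]
            · simp [hC h h', hx])]
        simp
      simp only [List.foldl_cons, hstep]
      rw [ih (A ++ [x]) B C
        (fun a ha => by rcases List.mem_append.mp ha with h' | h'
                        · exact hA a h'
                        · simp at h'; simpa [h'] using hx)
        hB hC]
      simp [List.filter_cons, hx]
    · have hstep : PySem.List.insertBy (fun a b => decide (get_priority a < get_priority b)) x (A ++ B ++ C)
          = A ++ (B ++ [x]) ++ C := by
        rw [insertBy_mid _ x (A ++ B) C
          (fun a ha => by
            rcases List.mem_append.mp ha with h' | h'
            · simp [hA a h', hx]
            · simp [hB a h', hx])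
          (fun h t hht => by
            have hh : h ∈ C := by rw [hht]; simp
            simp [hC h hh, hx])]
        simp
      simp only [List.foldl_cons, hstep]
      rw [ih A (B ++ [x]) C hA
        (fun a ha => by rcases List.mem_append.mp ha with h' | h'
                        · exact hB a h'
                        · simp at h'; simpa [h'] using hx)
        hC]
      simp [List.filter_cons, hx]
    · have hstep : PySem.List.insertBy (fun a b => decide (get_priority a < get_priority b)) x (A ++ B ++ C)
          = A ++ B ++ (C ++ [x]) := by
        rw [PySem.List.insertBy_of_forall_not_before _ x (A ++ B ++ C)
          (fun a ha => by
            rcases List.mem_append.mp ha with h' | h'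
            · rcases List.mem_append.mp h' with h'' | h''
              · simp [hA a h'', hx]
              · simp [hB a h'', hx]
            · simp [hC a h', hx])]
        simp
      simp only [List.foldl_cons, hstep]
      rw [ih A B (C ++ [x]) hA hB
        (fun a ha => by rcases List.mem_append.mp ha with h' | h'
                        · exact hC a h'
                        · simp at h'; simpa [h'] using hx)]
      simp [List.filter_cons, hx]

-- B's single pass produces exactly those three filters
lemma foldl_buckets :
    ∀ (xs : List String) (A B C : List String),
      xs.foldl altStep (A, B, C) =
        (A ++ xs.filter (fun p => decide (get_priority p = 0)),
         B ++ xs.filter (fun p => decide (get_priority p = 1)),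
         C ++ xs.filter (fun p => decide (get_priority p = 2))) := by
  intro xs
  induction xs with
  | nil => intro A B C; simp
  | cons x xs ih =>
    intro A B C
    by_cases h0 : PySem.Str.startswith x ".job-board/03_COMPLETED"
    · simp only [List.foldl_cons, altStep, h0, if_true]
      rw [ih]
      simp at h0
      simp [List.filter_cons, key_cases, h0]
    · by_cases h1 : PySem.Str.startswith x ".job-board/02_CLAIMED"
      · simp only [List.foldl_cons, altStep, h0, h1]
        rw [ih]
        simp at h0 h1
        simp [List.filter_cons, key_cases, h0, h1]
      · simp only [List.foldl_cons, altStep, h0, h1]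
        rw [ih]
        simp at h0 h1
        simp [List.filter_cons, key_cases, h0, h1]

lemma same_ordered (xs : List String) :
    PySem.List.sorted xs get_priority =
      (xs.foldl altStep ([], [], [])).1 ++ (xs.foldl altStep ([], [], [])).2.1 ++
        (xs.foldl altStep ([], [], [])).2.2 := by
  rw [PySem.List.sorted_eq_foldl_insertBy, foldl_buckets]
  have := sort_buckets xs [] [] [] (by simp) (by simp) (by simp)
  simpa using this

-- ===== VERDICT (by name: the statement is the Claim_ definition above) =====
theorem select_canonical_spec : Claim_equal_select_canonical := by
  intro xs _ _
  unfold Spec_select_canonical select_canonical select_canonical_alt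
  rw [same_ordered]
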